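-- pv_equiv track=rewrite | github.com/Roha-Lee/sw_jungle_week_01 | exam/2503.py | count_possible_cases
-- ===== SOURCE A (Python) =====
-- from itertools import permutations
--
-- def is_correct_answer(ans, query, strike, ball):
--     '''
--     정답(ans), 질문(query)가 들어왔을 때 스트라이크, 볼 값을 계산하고 이를 입력된 strike, ball과 일치하는 지 확인하는 함수
--
--     Args:
--         ans(Sequence): 정답
--         query(Sequence): 질문
--         strike(int): 입력으로 들어온 스트라이크
--         ball(int): 입력으로 들어온 볼
--     Returns:
--         bool, 일치하면 True, 아니면 False
--     '''
--     ball_list = [False] * 3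
--     strike_list = [False] * 3
--     for i in range(3):
--         strike_list[i] = ans[i] == query[i]
--         ball_list[i] = query[i] in ans
--
--     calc_strike = sum(strike_list)
--     # 423, 432가 나왔을때 sum(ball_list) = 3, sum(strike_list) = 1이므로
--     # 1 strike, 2 ball을 만들어준다.
--     calc_ball = sum(ball_list) - sum(strike_list)
--     if calc_ball == ball and calc_strike == strike:
--         return True
--     return False
--
-- def count_possible_cases(questions):
--     '''
--     주어진 질문/답변에 대하여 답의 가능성이 있는 경우를 세는 함수
--
--     Args:
--         questions(list[tuple[tuple[int], int, int]]) : 질문과 답변에 대한 정보들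
--     Returns:
--         int : 경우의 수
--     '''
--     perms = list(permutations(range(1, 10), 3))
--     valid = [True] * len(perms)
--     for query, strike, ball in questions:
--         for i in range(len(perms)):
--             if valid[i] and not is_correct_answer(perms[i], query, strike, ball):
--                 valid[i] = False
--
--     return sum(valid)
-- ===== SOURCE B (Python) =====
-- from itertools import combinations, permutations
--
-- def count_possible_cases(questions):
--     # Two-phase search: enumerate the 84 unordered digit sets, prune a whole set at once
--     # using the order-independent membership count (strike+ball), then check only the
--     # positional strike counts on the 6 orderings of the surviving sets.
--     total = 0
--     for digits in combinations(range(1, 10), 3):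
--         dset = set(digits)
--         if any(sum(qd in dset for qd in q) != s + b for q, s, b in questions):
--             continue
--         for perm in permutations(digits):
--             if all(sum(p == qd for p, qd in zip(perm, q)) == s for q, s, b in questions):
--                 total += 1
--     return total
-- ===== Notes on version B (the rewrite author's own statement) =====
-- stated objective: alternative
-- what changed: Replaces A's flat elimination mask over all 504 permutations with a two-phase search: enumerate the 84 unordered digit combinations, prune each whole set at once via the order-independent membership count (which must equal strike+ball for every clue), and check only positional strike counts on the 6 orderings of surviving sets.
import Mathlib
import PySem

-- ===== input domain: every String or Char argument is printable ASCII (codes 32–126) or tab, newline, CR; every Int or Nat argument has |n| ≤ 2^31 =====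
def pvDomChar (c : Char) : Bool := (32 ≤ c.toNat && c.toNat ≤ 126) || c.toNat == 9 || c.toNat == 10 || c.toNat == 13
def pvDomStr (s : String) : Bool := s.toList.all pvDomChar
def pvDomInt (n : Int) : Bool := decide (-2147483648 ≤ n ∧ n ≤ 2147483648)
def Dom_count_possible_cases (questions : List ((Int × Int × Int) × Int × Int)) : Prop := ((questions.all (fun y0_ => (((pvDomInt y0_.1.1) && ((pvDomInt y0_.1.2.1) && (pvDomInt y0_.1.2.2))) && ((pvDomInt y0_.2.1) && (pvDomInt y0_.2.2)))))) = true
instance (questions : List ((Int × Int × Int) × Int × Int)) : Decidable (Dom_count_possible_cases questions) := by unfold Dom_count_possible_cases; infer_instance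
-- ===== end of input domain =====

-- B replaces A's flat scan over all 504 permutations with a two-phase search: it
-- enumerates the 84 unordered digit sets, prunes a whole set at once by the
-- order-independent membership count (strike+ball), and checks only the positional
-- strike counts on the 6 orderings of the surviving sets (objective: alternative).

-- ===== PORT A =====
-- is_correct_answer, used by A.
def is_correct_answer (ans query : Int × Int × Int) (strike ball : Int) : Bool :=
  let aL : List Int := [ans.1, ans.2.1, ans.2.2]
  let qL : List Int := [query.1, query.2.1, query.2.2]
  let strike_list : List Bool := (List.range 3).map (fun i => aL.getD i 0 == qL.getD i 0)
  let ball_list : List Bool := (List.range 3).map (fun i => aL.contains (qL.getD i 0))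
  let calc_strike : Int := (strike_list.map (fun b => if b then (1:Int) else 0)).sum
  let calc_ball : Int := (ball_list.map (fun b => if b then (1:Int) else 0)).sum - calc_strike
  if calc_ball == ball && calc_strike == strike then true else false

-- list(permutations(range(1,10), 3)): all ordered triples of distinct elements of 1..9,
-- in itertools' lexicographic order (exact hand port; PySem has no permutations).
def perms3 : List (Int × Int × Int) :=
  (PySem.List.pyRange 1 10 1).flatMap (fun a =>
    (PySem.List.pyRange 1 10 1).flatMap (fun b =>
      ((PySem.List.pyRange 1 10 1).filter (fun c => a ≠ b && a ≠ c && b ≠ c)).map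
        (fun c => (a, b, c))))

-- The in-place loop 'for i in range(len(perms)): if valid[i] and not correct: valid[i]=False'
-- touches each index independently; it is ported as the elementwise update
-- valid[i] := valid[i] && correct(perms[i], …)  (exact, same state, same order).
def count_possible_cases (questions : List ((Int × Int × Int) × Int × Int)) : Int :=
  let perms := perms3
  let valid : List Bool := List.replicate perms.length true
  let valid := questions.foldl (fun valid qsb =>
    List.zipWith (fun v p => v && is_correct_answer p qsb.1 qsb.2.1 qsb.2.2) valid perms) valid
  (valid.map (fun b => if b then (1:Int) else 0)).sum

-- ===== PORT B =====
-- itertools.combinations(range(1,10), 3): increasing triples a < b < c, lex order.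
def combs3 : List (Int × Int × Int) :=
  (PySem.List.pyRange 1 10 1).flatMap (fun a =>
    (PySem.List.pyRange (a+1) 10 1).flatMap (fun b =>
      (PySem.List.pyRange (b+1) 10 1).map (fun c => (a, b, c))))

-- itertools.permutations of a 3-tuple: its 6 orderings in itertools order.
def orderings3 (d : Int × Int × Int) : List (Int × Int × Int) :=
  [(d.1, d.2.1, d.2.2), (d.1, d.2.2, d.2.1), (d.2.1, d.1, d.2.2),
   (d.2.1, d.2.2, d.1), (d.2.2, d.1, d.2.1), (d.2.2, d.2.1, d.1)]

-- sum(qd in dset for qd in q): per-position membership count of the query in the digit set.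
def memCount (d q : Int × Int × Int) : Int :=
  ([q.1, q.2.1, q.2.2].map (fun x =>
    if [d.1, d.2.1, d.2.2].contains x then (1:Int) else 0)).sum

-- sum(p == qd for p, qd in zip(perm, q)): positional strike count.
def strikeCount (p q : Int × Int × Int) : Int :=
  ((List.zip [p.1, p.2.1, p.2.2] [q.1, q.2.1, q.2.2]).map (fun pq =>
    if pq.1 == pq.2 then (1:Int) else 0)).sum

def count_possible_cases_alt (questions : List ((Int × Int × Int) × Int × Int)) : Int :=
  combs3.foldl (fun total d =>
    if questions.any (fun qsb => memCount d qsb.1 != qsb.2.1 + qsb.2.2) then total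
    else (orderings3 d).foldl (fun t p =>
      if questions.all (fun qsb => strikeCount p qsb.1 == qsb.2.1) then t + 1 else t) total) 0

-- ===== PRECONDITION & SPEC =====
def Spec_count_possible_cases (questions : List ((Int × Int × Int) × Int × Int)) (out : Int) : Prop := out = count_possible_cases_alt questions
instance (questions : List ((Int × Int × Int) × Int × Int)) (out : Int) : Decidable (Spec_count_possible_cases questions out) := by unfold Spec_count_possible_cases; infer_instance

-- ===== CLAIM =====
def Claim_equal_count_possible_cases : Prop := ∀ (questions : List ((Int × Int × Int) × Int × Int)), Dom_count_possible_cases questions → Spec_count_possible_cases questions (count_possible_cases questions)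

-- ===== LEMMAS AND PROOFS =====

-- the combined per-question predicate both sides decide
def okQ (p : Int × Int × Int) (qsb : (Int × Int × Int) × Int × Int) : Bool :=
  (memCount p qsb.1 == qsb.2.1 + qsb.2.2) && (strikeCount p qsb.1 == qsb.2.1)

def okAll (questions : List ((Int × Int × Int) × Int × Int)) (p : Int × Int × Int) : Bool :=
  questions.all (okQ p)

-- ---- A side: the mask fold counts the permutations passing every clue ----
theorem zipWith_map_self {α β : Type} (f : β → α → β) (g : α → β) (l : List α) :
    List.zipWith f (l.map g) l = l.map (fun p => f (g p) p) := by
  induction l with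
  | nil => rfl
  | cons x xs ih => simp [ih]

theorem fold_mask {α Q : Type} (f : α → Q → Bool) (qs : List Q) (perms : List α) (g : α → Bool) :
    qs.foldl (fun valid q => List.zipWith (fun v p => v && f p q) valid perms) (perms.map g)
      = perms.map (fun p => qs.foldl (fun b q => b && f p q) (g p)) := by
  induction qs generalizing g with
  | nil => rfl
  | cons q qs ih =>
      simp only [List.foldl_cons, zipWith_map_self]
      exact ih (fun p => g p && f p q)

theorem foldl_and_eq_all {Q : Type} (f : Q → Bool) (qs : List Q) (b : Bool) :
    qs.foldl (fun acc q => acc && f q) b = (b && qs.all f) := by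
  induction qs generalizing b with
  | nil => simp
  | cons q qs ih => simp [List.foldl_cons, ih, Bool.and_assoc]

theorem sum_ones_countP {α : Type} (l : List α) (g : α → Bool) :
    ((l.map g).map (fun b => if b then (1:Int) else 0)).sum = (l.countP g : Int) := by
  induction l with
  | nil => rfl
  | cons x xs ih =>
      simp only [List.map_cons, List.sum_cons, List.countP_cons, ih]
      by_cases h : g x <;> simp [h] <;> omega

-- is_correct_answer equals the okQ predicate (Int arithmetic, by omega)
set_option maxRecDepth 10000 in
theorem is_correct_eq_okQ (p : Int × Int × Int) (qsb : (Int × Int × Int) × Int × Int) :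
    is_correct_answer p qsb.1 qsb.2.1 qsb.2.2 = okQ p qsb := by
  obtain ⟨⟨q1, q2, q3⟩, s, b⟩ := qsb
  obtain ⟨a1, a2, a3⟩ := p
  simp only [is_correct_answer, okQ, memCount, strikeCount, List.range_succ, List.range_zero]
  norm_num [List.getD, List.contains_cons]
  by_cases h1 : a1 = q1 <;> by_cases h2 : a2 = q2 <;> by_cases h3 : a3 = q3 <;>
    simp_all <;>
      (rw [Bool.eq_iff_iff]
       simp only [Bool.and_eq_true, decide_eq_true_eq, beq_iff_eq]
       (try split_ifs) <;> omega)

set_option maxRecDepth 10000 in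
theorem countA (questions : List ((Int × Int × Int) × Int × Int)) :
    count_possible_cases questions = (perms3.countP (okAll questions) : Int) := by
  unfold count_possible_cases
  have hrep : List.replicate perms3.length true = perms3.map (fun _ => true) := by simp
  simp only [hrep, fold_mask, foldl_and_eq_all, Bool.true_and]
  rw [sum_ones_countP]
  congr 1
  apply List.countP_congr
  intro p _
  have h : (fun q => is_correct_answer p q.1 q.2.1 q.2.2) = okQ p :=
    funext (fun q => is_correct_eq_okQ p q)
  simp only [okAll, h]

-- ---- B side: the two-phase fold counts okAll over the flattened orderings ----

-- membership in the three digits is the same for every ordering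
theorem memCount_ordering (d p : Int × Int × Int) (h : p ∈ orderings3 d) (q : Int × Int × Int) :
    memCount p q = memCount d q := by
  obtain ⟨a, b, c⟩ := d
  simp only [orderings3, List.mem_cons, List.not_mem_nil, or_false] at h
  rcases h with h | h | h | h | h | h <;> subst h <;>
    simp only [memCount, List.contains_cons, List.contains_nil, Bool.or_false,
      Bool.or_comm, Bool.or_left_comm, Bool.or_assoc]

theorem inner_fold (l : List (Int × Int × Int)) (f : Int × Int × Int → Bool) (t : Int) :
    l.foldl (fun t p => if f p then t + 1 else t) t = t + (l.countP f : Int) := by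
  induction l generalizing t with
  | nil => simp
  | cons x xs ih =>
      simp only [List.foldl_cons, List.countP_cons, ih]
      by_cases h : f x <;> simp [h] <;> push_cast <;> ring

theorem step_eq (questions : List ((Int × Int × Int) × Int × Int)) (d : Int × Int × Int)
    (t : Int) :
    (if questions.any (fun qsb => memCount d qsb.1 != qsb.2.1 + qsb.2.2) then t
     else (orderings3 d).foldl (fun t p =>
       if questions.all (fun qsb => strikeCount p qsb.1 == qsb.2.1) then t + 1 else t) t)
    = t + ((orderings3 d).countP (okAll questions) : Int) := by
  by_cases h : questions.any (fun qsb => memCount d qsb.1 != qsb.2.1 + qsb.2.2)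
  · rw [if_pos h]
    have : (orderings3 d).countP (okAll questions) = 0 := by
      rw [List.countP_eq_zero]
      intro p hp
      simp only [List.any_eq_true, bne_iff_ne, ne_eq] at h
      obtain ⟨qsb, hq, hne⟩ := h
      intro hall
      simp only [okAll, List.all_eq_true] at hall
      have := hall qsb hq
      simp only [okQ, Bool.and_eq_true, beq_iff_eq] at this
      exact hne (by rw [← memCount_ordering d p hp qsb.1]; exact this.1)
    rw [this]; simp
  · rw [if_neg h, inner_fold]
    congr 2
    apply List.countP_congr
    intro p hp
    simp only [List.any_eq_true, bne_iff_ne, ne_eq, not_exists, not_and, not_not] at h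
    constructor
    · intro hs
      simp only [okAll, List.all_eq_true] at *
      intro qsb hq
      simp only [okQ, Bool.and_eq_true, beq_iff_eq]
      exact ⟨by rw [memCount_ordering d p hp]; exact h qsb hq, by
        have := hs qsb hq; simpa using this⟩
    · intro hs
      simp only [okAll, List.all_eq_true] at *
      intro qsb hq
      have := hs qsb hq
      simp only [okQ, Bool.and_eq_true, beq_iff_eq] at this
      simpa using this.2

theorem countB (questions : List ((Int × Int × Int) × Int × Int)) :
    count_possible_cases_alt questions
      = ((combs3.flatMap orderings3).countP (okAll questions) : Int) := by
  unfold count_possible_cases_alt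
  have gen : ∀ (l : List (Int × Int × Int)) (t : Int),
      l.foldl (fun total d =>
        if questions.any (fun qsb => memCount d qsb.1 != qsb.2.1 + qsb.2.2) then total
        else (orderings3 d).foldl (fun t p =>
          if questions.all (fun qsb => strikeCount p qsb.1 == qsb.2.1) then t + 1 else t) total) t
      = t + ((l.flatMap orderings3).countP (okAll questions) : Int) := by
    intro l
    induction l with
    | nil => intro t; simp
    | cons d ds ih =>
        intro t
        simp only [List.foldl_cons, List.flatMap_cons, List.countP_append]
        rw [step_eq, ih]
        push_cast; ring
  rw [gen]; ring

-- the two enumeration orders are permutations of each other (closed lists)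
set_option maxRecDepth 100000 in
theorem perm_enum : perms3.Perm (combs3.flatMap orderings3) := by decide

-- ===== VERDICT =====
theorem count_possible_cases_spec : Claim_equal_count_possible_cases := by
  intro questions _
  show count_possible_cases questions = count_possible_cases_alt questions
  rw [countA, countB, perm_enum.countP_eq]
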